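-- pv_equiv track=rewrite | github.com/lrlip/Festo-Code-Challenge-2023 | utils/keyforger.py | string_A_needs_an_F
-- ===== SOURCE A (Python) =====
-- def string_A_needs_an_F(key):
--     """When A exists, it needs to be an AF or FA
--
--     Args:
--         key (_type_): _description_
--
--     Returns:
--         _type_: _description_
--     """
--     res_A = [i for i in range(len(key)) if key.startswith('A', i)]
--     res_AF = [i for i in range(len(key)) if key.startswith('AF', i)]
--     res_FA = [i for i in range(len(key)) if key.startswith('FA', i)]
--
--     res_AF_FA = set(res_AF + [idx + 1 for idx in res_FA])
--
--     # Every A needs a AF or an FA so length A cannot be bigger than set of FA, AF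
--     if len(res_A) > len(res_AF_FA):
--         return None
--
--     return key
-- ===== SOURCE B (Python) =====
-- def string_A_needs_an_F(key):
--     """When A exists, it needs to be an AF or FA"""
--     for i in range(len(key)):
--         if key.startswith('A', i):
--             if not (key.startswith('AF', i) or (i > 0 and key.startswith('FA', i - 1))):
--                 return None
--     return key
-- ===== Notes on version B (the rewrite author's own statement) =====
-- stated objective: faster
-- what changed: Replaces the three index-comprehensions, the shifted-index set union and the cardinality comparison by one short-circuiting pass over the indices that checks each occurrence of the letter A directly for an adjacent F and returns None at the first violation.
import Mathlib
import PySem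

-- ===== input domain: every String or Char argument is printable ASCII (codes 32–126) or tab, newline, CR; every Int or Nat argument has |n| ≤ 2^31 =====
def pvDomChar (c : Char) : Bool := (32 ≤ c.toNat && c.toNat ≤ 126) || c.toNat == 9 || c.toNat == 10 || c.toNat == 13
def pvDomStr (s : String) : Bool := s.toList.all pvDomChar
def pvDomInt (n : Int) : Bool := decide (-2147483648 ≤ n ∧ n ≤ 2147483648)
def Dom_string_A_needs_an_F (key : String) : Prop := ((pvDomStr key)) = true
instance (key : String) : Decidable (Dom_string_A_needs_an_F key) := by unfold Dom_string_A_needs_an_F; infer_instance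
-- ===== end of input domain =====

-- B is a single short-circuiting pass (measured faster by a constant factor) checking each 'A' directly for an adjacent 'F'; return values only, no mutation.

-- ===== PORT A =====
-- key.startswith(p, i) with 0 ≤ i is exactly: p is a prefix of the list of chars dropped by i
def string_A_needs_an_F (key : String) : Option String :=
  let ls := key.toList
  let res_A := (List.range ls.length).filter (fun i => ['A'].isPrefixOf (ls.drop i))
  let res_AF := (List.range ls.length).filter (fun i => ['A','F'].isPrefixOf (ls.drop i))
  let res_FA := (List.range ls.length).filter (fun i => ['F','A'].isPrefixOf (ls.drop i))
  let res_AF_FA := PySem.Set.ofList (res_AF ++ res_FA.map (· + 1))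
  if res_AF_FA.length < res_A.length then none else some key

-- ===== PORT B =====
def string_A_needs_an_F_alt (key : String) : Option String :=
  let ls := key.toList
  if (List.range ls.length).all (fun i =>
      !(['A'].isPrefixOf (ls.drop i)) ||
        (['A','F'].isPrefixOf (ls.drop i) || (decide (0 < i) && ['F','A'].isPrefixOf (ls.drop (i - 1)))))
  then some key else none

-- ===== PRECONDITION & SPEC =====
def Spec_string_A_needs_an_F (key : String) (out : Option String) : Prop := out = string_A_needs_an_F_alt key
instance (key : String) (out : Option String) : Decidable (Spec_string_A_needs_an_F key out) := by unfold Spec_string_A_needs_an_F; infer_instance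

-- ===== CLAIM (what is proved, stated in full; the proofs are below) =====
def Claim_equal_string_A_needs_an_F : Prop := ∀ (key : String), Dom_string_A_needs_an_F key → Spec_string_A_needs_an_F key (string_A_needs_an_F key)

-- ===== LEMMAS AND PROOFS =====

-- the bordered-by-F condition B checks at index i
def pvQ (ls : List Char) (i : Nat) : Bool :=
  ['A','F'].isPrefixOf (ls.drop i) || (decide (0 < i) && ['F','A'].isPrefixOf (ls.drop (i - 1)))

lemma pv_mem_set (ls : List Char) (i : Nat) :
    i ∈ PySem.Set.ofList
        (((List.range ls.length).filter (fun j => ['A','F'].isPrefixOf (ls.drop j))) ++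
          ((List.range ls.length).filter (fun j => ['F','A'].isPrefixOf (ls.drop j))).map (· + 1)) ↔
    i ∈ (List.range ls.length).filter (fun j => ['A'].isPrefixOf (ls.drop j)) ∧ pvQ ls i = true := by
  simp only [PySem.Set.mem_ofList, List.mem_append, List.mem_filter, List.mem_range,
    List.mem_map, pvQ]
  constructor
  · rintro (⟨hi, hAF⟩ | ⟨j, ⟨hj, hFA⟩, rfl⟩)
    · have hA : ['A'].isPrefixOf (ls.drop i) = true := by
        rcases List.isPrefixOf_iff_prefix.mp hAF with ⟨t, ht⟩
        exact List.isPrefixOf_iff_prefix.mpr ⟨'F' :: t, by simpa using ht⟩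
      exact ⟨⟨hi, hA⟩, by simp [hAF]⟩
    · rcases List.isPrefixOf_iff_prefix.mp hFA with ⟨t, ht⟩
      have hdrop : ls.drop (j + 1) = 'A' :: t := by
        have := congrArg (List.drop 1) ht
        simpa [List.drop_drop] using this.symm
      have hjlt : j + 1 < ls.length := by
        have h2 := congrArg List.length hdrop
        simp [List.length_drop] at h2
        omega
      refine ⟨⟨hjlt, List.isPrefixOf_iff_prefix.mpr ⟨t, by simp [hdrop]⟩⟩, ?_⟩
      simp only [Nat.add_sub_cancel]
      simp [hFA]
  · rintro ⟨⟨hi, hA⟩, hq⟩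
    rcases Bool.or_eq_true_iff.mp hq with hAF | hFA
    · exact Or.inl ⟨hi, hAF⟩
    · rcases Bool.and_eq_true_iff.mp hFA with ⟨hpos, hFA'⟩
      have hpos' : 0 < i := by simpa using hpos
      refine Or.inr ⟨i - 1, ⟨?_, hFA'⟩, by omega⟩
      omega

lemma pv_set_nodup (ls : List Char) :
    (PySem.Set.ofList
        (((List.range ls.length).filter (fun j => ['A','F'].isPrefixOf (ls.drop j))) ++
          ((List.range ls.length).filter (fun j => ['F','A'].isPrefixOf (ls.drop j))).map (· + 1))).Nodup :=
  PySem.Set.nodup_ofList _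

lemma pv_set_length (ls : List Char) :
    (PySem.Set.ofList
        (((List.range ls.length).filter (fun j => ['A','F'].isPrefixOf (ls.drop j))) ++
          ((List.range ls.length).filter (fun j => ['F','A'].isPrefixOf (ls.drop j))).map (· + 1))).length
      = (((List.range ls.length).filter (fun j => ['A'].isPrefixOf (ls.drop j))).filter (pvQ ls)).length := by
  apply List.Perm.length_eq
  apply List.perm_of_nodup_nodup_toFinset_eq (pv_set_nodup ls)
  · exact List.Nodup.filter _ (List.Nodup.filter _ (List.nodup_range))
  · ext i
    simp only [List.mem_toFinset, List.mem_filter, List.mem_range]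
    rw [pv_mem_set]
    simp [List.mem_filter]

-- ===== VERDICT (by name: the statement is the Claim_ definition above) =====
theorem string_A_needs_an_F_spec : Claim_equal_string_A_needs_an_F := by
  intro key _
  show string_A_needs_an_F key = string_A_needs_an_F_alt key
  unfold string_A_needs_an_F string_A_needs_an_F_alt
  simp only []
  set ls := key.toList with hls
  set resA := (List.range ls.length).filter (fun j => ['A'].isPrefixOf (ls.drop j)) with hresA
  set resS := PySem.Set.ofList
      (((List.range ls.length).filter (fun j => ['A','F'].isPrefixOf (ls.drop j))) ++
        ((List.range ls.length).filter (fun j => ['F','A'].isPrefixOf (ls.drop j))).map (· + 1)) with hresS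
  have hlen := pv_set_length ls
  have hfil : (resA.filter (pvQ ls)).length ≤ resA.length := List.length_filter_le _ _
  by_cases hall : ∀ i ∈ resA, pvQ ls i = true
  · have heq : (resA.filter (pvQ ls)).length = resA.length :=
      congrArg List.length (List.filter_eq_self.mpr hall)
    have hcond : ¬ (resS.length < resA.length) := by rw [hresS, hlen, hresA] at *; omega
    rw [if_neg hcond, if_pos]
    rw [List.all_eq_true]
    intro i hi
    rw [List.mem_range] at hi
    by_cases hA : ['A'].isPrefixOf (ls.drop i)
    · have := hall i (by rw [hresA, List.mem_filter]; exact ⟨List.mem_range.mpr hi, hA⟩)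
      rw [pvQ] at this
      simp [this, hA]
    · simp [hA]
  · have hne : (resA.filter (pvQ ls)).length ≠ resA.length := by
      intro h
      exact hall (List.length_filter_eq_length_iff.mp h)
    have hcond : (resS.length < resA.length) := by rw [hresS, hlen, hresA] at *; omega
    rw [if_pos hcond, if_neg]
    rw [List.all_eq_true]
    push_neg at hall
    rcases hall with ⟨i, hi, hq⟩
    rw [hresA, List.mem_filter, List.mem_range] at hi
    intro h
    have := h i (List.mem_range.mpr hi.1)
    rw [pvQ] at hq
    simp [hi.2] at this
    simp [this] at hq
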